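-- pv_equiv track=rewrite | github.com/IsraelKarpel/hand-sign-project | Dictionary.py | create_length_Array
-- ===== SOURCE A (Python) =====
-- def find_longest_word(dict):
--     max_len = -1
--     for phrase in dict:
--         if (len(phrase)) > max_len:
--             max_len = len(phrase)
--     return max_len
--
-- def create_length_Array(dict):
--     lenArray = []
--     max_length = find_longest_word(dict)
--     for i in range(0, max_length + 1):
--         arr = []
--         lenArray.append(arr)
--     for phrase in dict:
--         lenArray[len(phrase)].append(phrase)
--     return lenArray
-- ===== SOURCE B (Python) =====
-- def create_length_Array(dict):
--     max_length = max(map(len, dict), default=-1)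
--     return [[phrase for phrase in dict if len(phrase) == i]
--             for i in range(max_length + 1)]
-- ===== Notes on version B (the rewrite author's own statement) =====
-- stated objective: simpler
-- what changed: B replaces A's preallocate-then-bucket single grouping pass with a per-length scan: it computes the max length via max(map(len, ...), default=-1) and builds each row i by filtering the phrases of that exact length, a different traversal (one scan per length instead of one placement pass).
import Mathlib
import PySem

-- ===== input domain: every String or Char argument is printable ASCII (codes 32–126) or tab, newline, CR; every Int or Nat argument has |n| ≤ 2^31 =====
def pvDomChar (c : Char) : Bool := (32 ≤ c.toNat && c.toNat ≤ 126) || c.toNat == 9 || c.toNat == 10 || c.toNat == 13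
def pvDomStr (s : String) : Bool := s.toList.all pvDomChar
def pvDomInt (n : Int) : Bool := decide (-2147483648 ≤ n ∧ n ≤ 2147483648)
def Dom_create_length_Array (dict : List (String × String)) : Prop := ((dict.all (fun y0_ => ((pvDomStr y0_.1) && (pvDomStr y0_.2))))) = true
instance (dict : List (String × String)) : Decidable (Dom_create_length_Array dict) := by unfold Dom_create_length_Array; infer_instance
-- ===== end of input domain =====

-- B computes max(map(len, dict), default=-1) and builds each row i by filtering the phrases of that length,
-- instead of A's find-longest pass + preallocation + index-mutation grouping pass (objective: simpler).

-- ===== PORT A =====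
def find_longest_word (dict : List String) : Int :=
  dict.foldl (fun max_len phrase =>
    if PySem.Str.len phrase > max_len then PySem.Str.len phrase else max_len) (-1)

-- iterating a Python dict iterates its keys (first-insertion order)
def create_length_Array (dict : List (String × String)) : List (List String) :=
  let keys := (PySem.Dict.ofList dict).keys
  let lenArray : List (List String) := []
  let max_length := find_longest_word keys
  let lenArray := (PySem.List.pyRange 0 (max_length + 1) 1).foldl
    (fun lenArray _ => lenArray ++ [([] : List String)]) lenArray
  keys.foldl (fun lenArray phrase =>
    PySem.List.pySetD lenArray (PySem.Str.len phrase)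
      (PySem.List.pyGetD lenArray (PySem.Str.len phrase) [] ++ [phrase])) lenArray

-- ===== PORT B =====
def create_length_Array_alt (dict : List (String × String)) : List (List String) :=
  let keys := (PySem.Dict.ofList dict).keys
  let max_length := PySem.List.maxD (keys.map PySem.Str.len) (fun k => k) (-1)
  (PySem.List.pyRange 0 (max_length + 1) 1).map
    (fun i => keys.filter (fun phrase => PySem.Str.len phrase == i))

-- ===== PRECONDITION & SPEC =====
def Spec_create_length_Array (dict : List (String × String)) (out : List (List String)) : Prop := out = create_length_Array_alt dict
instance (dict : List (String × String)) (out : List (List String)) : Decidable (Spec_create_length_Array dict out) := by unfold Spec_create_length_Array; infer_instance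

-- ===== CLAIM (what is proved, stated in full; the proofs are below) =====
def Claim_equal_create_length_Array : Prop := ∀ (dict : List (String × String)), Dom_create_length_Array dict → Spec_create_length_Array dict (create_length_Array dict)

-- ===== LEMMAS AND PROOFS =====

theorem max_agree (lens : List Int) (h0 : ∀ z ∈ lens, 0 ≤ z) :
    PySem.List.maxD lens (fun k => k) (-1) = lens.foldl max (-1) := by
  cases lens with
  | nil => rfl
  | cons x t =>
    unfold PySem.List.maxD
    rw [PySem.List.max?_id_cons]
    simp only [Option.getD_some, List.foldl_cons]
    rw [show max (-1:Int) x = x by have := h0 x (by simp); omega]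

theorem fillA (ks : List String) (arr : List (List String))
    (h : ∀ p ∈ ks, (PySem.Str.len p).toNat < arr.length) :
    ks.foldl (fun a p =>
        PySem.List.pySetD a (PySem.Str.len p)
          (PySem.List.pyGetD a (PySem.Str.len p) [] ++ [p])) arr
      = arr.mapIdx (fun i a => a ++ ks.filter (fun p => PySem.Str.len p == (i : Int))) := by
  induction ks generalizing arr with
  | nil =>
    apply List.ext_getElem <;> simp
  | cons p t ih =>
    have hp : (PySem.Str.len p).toNat < arr.length := h p (by simp)
    have hlen : PySem.Str.len p = (((PySem.Str.len p).toNat : Nat) : Int) := by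
      simp [PySem.Str.len_eq]
    set n := (PySem.Str.len p).toNat with hn
    rw [List.foldl_cons]
    rw [hlen, PySem.List.pySetD_natCast, PySem.List.pyGetD_natCast]
    rw [ih _ (by intro q hq; rw [List.length_set]; exact h q (by simp [hq]))]
    have hpl : p.length = n := by simp [hn, PySem.Str.len_eq]
    apply List.ext_getElem
    · simp
    · intro i h1 h2
      simp only [List.getElem_mapIdx, List.getElem_set]
      by_cases hi : i = n
      · subst hi
        rw [if_pos rfl]
        simp only [List.filter_cons]
        rw [if_pos (by simp [PySem.Str.len_eq, hn])]
        simp [hp, List.append_assoc]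
      · rw [if_neg (by omega)]
        simp only [List.filter_cons]
        rw [if_neg (by simp [PySem.Str.len_eq]; omega)]

theorem flw_eq_foldl_max (ks : List String) :
    find_longest_word ks = (ks.map PySem.Str.len).foldl max (-1) := by
  unfold find_longest_word
  rw [List.foldl_map]
  apply PySem.List.foldl_congr_mem
  intro acc x _
  rw [max_def]
  split_ifs <;> omega

theorem a_eq_b (dict : List (String × String)) :
    create_length_Array dict = create_length_Array_alt dict := by
  unfold create_length_Array create_length_Array_alt
  set ks := (PySem.Dict.ofList dict).keys with hks
  clear_value ks
  simp only []
  have h0 : ∀ z ∈ ks.map PySem.Str.len, (0:Int) ≤ z := by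
    intro z hz
    simp only [List.mem_map] at hz
    obtain ⟨p, _, rfl⟩ := hz
    simp [PySem.Str.len_eq]
  rw [max_agree _ h0, ← flw_eq_foldl_max]
  set M := find_longest_word ks with hM
  have hbound : ∀ p ∈ ks, PySem.Str.len p ≤ M := by
    intro p hp
    rw [hM, flw_eq_foldl_max]
    exact (PySem.List.le_foldl_max _ _).2 _ (List.mem_map_of_mem hp)
  have hM0 : -1 ≤ M := by
    rw [hM, flw_eq_foldl_max]; exact (PySem.List.le_foldl_max _ _).1
  rw [PySem.List.foldl_append_singleton_eq_map (fun _ => ([] : List String))]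
  rw [List.nil_append]
  have hinitlen : ((PySem.List.pyRange 0 (M+1) 1).map (fun _ => ([] : List String))).length
      = (M+1).toNat := by
    simp [PySem.List.length_pyRange_one]
  rw [fillA ks _ (by
    intro p hp
    rw [hinitlen]
    have := hbound p hp
    have : 0 ≤ PySem.Str.len p := by simp [PySem.Str.len_eq]
    omega)]
  apply List.ext_getElem
  · simp [PySem.List.length_pyRange_one]
  · intro i h1 h2
    simp only [List.getElem_mapIdx, List.getElem_map, List.getElem_map]
    rw [PySem.List.getElem_pyRange_one]
    simp

-- ===== VERDICT (by name: the statement is the Claim_ definition above) =====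
theorem create_length_Array_spec : Claim_equal_create_length_Array := by
  intro dict _
  exact a_eq_b dict
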